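-- pv_equiv track=rewrite | github.com/frostdpr/word-search-robot | pipeline.py | letter_swap
-- ===== SOURCE A (Python) =====
-- word_swap = {
--     "E": "F",
--     "F": "E",
--     "M": "H",
--     "H": "M",
--     "C": "G",
--     "G": "C",
--     "O": "Q",
--     "Q": "O",
--     }
--
-- def binary_num(bin_str, max_length):
--
--     l = len(bin_str)
--     num = list(bin_str)
--     i = l - 1
--
--     while i >= 0:
--         if num[i] == "0":
--             num[i] = "1"
--             break
--         else:
--             num[i] = "0"
--         i -= 1
--
--     bin_str = "".join(num)
--
--     if i < 0:
--         bin_str = "1" + bin_str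
--
--     if len(bin_str) > max_length:
--
--         bin_str = ""
--
--         for i in range(max_length):
--             bin_str += "0"
--
--     return bin_str
--
-- def letter_swap(word):
--     letter_locations = []
--     permutations = []
--
--     for char in enumerate(word):
--         if char[1] in word_swap.keys():
--             letter_locations.append(char)
--
--     cardinality = len(letter_locations)
--
--     bin_str = ""
--     for i in range(cardinality):
--         if i == cardinality - 1:
--             bin_str += "1"
--             break
--
--         bin_str += "0"
--
--     while "1" in bin_str:
--
--         perm = word
--         for tup in enumerate(letter_locations):
--             if bin_str[tup[0]] == "1":
--                 perm = perm[: tup[1][0]] + word_swap[tup[1][1]] + perm[tup[1][0] + 1 :]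
--
--         permutations.append(perm)
--         bin_str = binary_num(bin_str, cardinality)
--     return permutations
-- ===== SOURCE B (Python) =====
-- word_swap = {
--     "E": "F",
--     "F": "E",
--     "M": "H",
--     "H": "M",
--     "C": "G",
--     "G": "C",
--     "O": "Q",
--     "Q": "O",
--     }
--
-- def letter_swap(word):
--     locs = [(i, c) for i, c in enumerate(word) if c in word_swap]
--     chars = list(word)
--     results = []
--
--     def rec(i):
--         if i == len(locs):
--             results.append("".join(chars))
--             return
--         pos, ch = locs[i]
--         rec(i + 1)                    # leave this letter as is
--         chars[pos] = word_swap[ch]    # swap it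
--         rec(i + 1)
--         chars[pos] = ch               # restore
--
--     rec(0)
--     return results[1:]                # drop the untouched original word
-- ===== Notes on version B (the rewrite author's own statement) =====
-- stated objective: alternative
-- what changed: A enumerates swap combinations by repeatedly incrementing a binary counter string and rebuilding each permutation with string slicing; B generates the same 2^k-1 permutations in the same counting order by a depth-first recursion over the swappable positions on a mutable char list, dropping the first (unswapped) leaf.
import Mathlib
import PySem

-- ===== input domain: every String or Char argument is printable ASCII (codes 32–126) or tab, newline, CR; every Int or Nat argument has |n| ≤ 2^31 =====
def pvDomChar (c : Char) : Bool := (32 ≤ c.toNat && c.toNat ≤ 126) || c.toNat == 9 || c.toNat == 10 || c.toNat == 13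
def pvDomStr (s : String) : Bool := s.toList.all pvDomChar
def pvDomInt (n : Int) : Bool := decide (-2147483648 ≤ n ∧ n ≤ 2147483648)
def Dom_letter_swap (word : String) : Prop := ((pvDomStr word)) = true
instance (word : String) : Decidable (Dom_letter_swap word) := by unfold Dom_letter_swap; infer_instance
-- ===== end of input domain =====

-- B replaces A's binary-counter string increment loop by a DFS over the swappable
-- positions that generates the 2^k swap combinations directly (objective: alternative).

-- ===== PORT A =====

-- the module-level word_swap dict (single-character strings are ported as Char)
def wordSwap : PySem.Dict Char Char :=
  PySem.Dict.ofList [('E','F'),('F','E'),('M','H'),('H','M'),('C','G'),('G','C'),('O','Q'),('Q','O')]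

-- binary_num's `while i >= 0` index loop, ported as recursion on i+1 (j = i+1);
-- returns (num, broke).  num[i] is always in range (i < len(num)), so getD/set are exact.
def bnLoop : List Char → Nat → (List Char × Bool)
  | num, 0 => (num, false)                                  -- i < 0: fell through, no break
  | num, j+1 =>
    if num.getD j ' ' == '0' then (num.set j '1', true)     -- num[i] = "1"; break
    else bnLoop (num.set j '0') j                           -- num[i] = "0"; i -= 1

def binary_num (bin_str : List Char) (max_length : Nat) : List Char :=
  let p := bnLoop bin_str bin_str.length
  let bin1 := if p.2 then p.1 else '1' :: p.1               -- if i < 0: bin_str = "1" + bin_str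
  if max_length < bin1.length then
    (List.range max_length).foldl (fun s _ => s ++ ['0']) []  -- for i in range(max_length): bin_str += "0"
  else bin1

-- for char in enumerate(word): if char[1] in word_swap.keys(): letter_locations.append(char)
def lsLocs (word : String) : List (Int × Char) :=
  (PySem.List.enumerate word.toList 0).foldl
    (fun acc ch => if wordSwap.contains ch.2 then acc ++ [ch] else acc) []

-- the bin_str-building loop over range(cardinality) with its break
def lsBinInit : List Nat → Nat → List Char → List Char
  | [], _, acc => acc
  | i :: rest, card, acc =>
    if i == card - 1 then acc ++ ['1']                      -- bin_str += "1"; break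
    else lsBinInit rest card (acc ++ ['0'])                 -- bin_str += "0"

-- one body of the inner `for tup in enumerate(letter_locations)` loop;
-- bin_str[tup[0]] is always in range (tup[0] < cardinality = len(bin_str)), so pyGetD is
-- exact; word_swap[tup[1][1]] has its key present, so getD is exact.
def lsPermStep (bin : List Char) (perm : List Char) (t : Int × (Int × Char)) : List Char :=
  if PySem.List.pyGetD bin t.1 ' ' == '1' then
    PySem.List.slice perm none (some t.2.1) ++ [wordSwap.getD t.2.2 t.2.2]
      ++ PySem.List.slice perm (some (t.2.1 + 1)) none      -- perm[:pos] + word_swap[ch] + perm[pos+1:]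
  else perm

def lsPerm (word : String) (locs : List (Int × Char)) (bin : List Char) : List Char :=
  (PySem.List.enumerate locs 0).foldl (lsPermStep bin) word.toList

-- the `while "1" in bin_str` loop; fuel 2^cardinality only makes it total
-- (the counter passes through at most 2^cardinality − 1 states with a "1" in them)
def lsWhile (word : String) (locs : List (Int × Char)) : List Char → List String → Nat → List String
  | _, acc, 0 => acc
  | bin, acc, fuel+1 =>
    if '1' ∈ bin then
      lsWhile word locs (binary_num bin locs.length)
        (acc ++ [String.ofList (lsPerm word locs bin)]) fuel
    else acc

def letter_swap (word : String) : List String :=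
  let locs := lsLocs word
  let card := locs.length
  lsWhile word locs (lsBinInit (List.range card) card []) [] (2 ^ card)

-- ===== PORT B =====

-- locs = [(i, c) for i, c in enumerate(word) if c in word_swap]
def lsAltLocs (word : String) : List (Int × Char) :=
  (PySem.List.enumerate word.toList 0).filter (fun p => wordSwap.contains p.2)

-- rec(i): first the branch that leaves chars[pos] alone, then the swapped branch
-- (mutate-then-restore is ported functionally; pos is always in range, key present)
def lsRec : List (Int × Char) → List Char → List String
  | [], chars => [String.ofList chars]
  | (pos, ch) :: rest, chars =>
      lsRec rest chars ++ lsRec rest (PySem.List.pySetD chars pos (wordSwap.getD ch ch))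

def letter_swap_alt (word : String) : List String :=
  (lsRec (lsAltLocs word) word.toList).drop 1               -- results[1:]

-- ===== PRECONDITION & SPEC =====
def Spec_letter_swap (word : String) (out : List String) : Prop := out = letter_swap_alt word
instance (word : String) (out : List String) : Decidable (Spec_letter_swap word out) := by unfold Spec_letter_swap; infer_instance

-- ===== CLAIM (what is proved, stated in full; the proofs are below) =====
def Claim_equal_letter_swap : Prop := ∀ (word : String), Dom_letter_swap word → Spec_letter_swap word (letter_swap word)

-- ===== LEMMAS AND PROOFS =====

/-- A bit mask rendered as a Python binary string. -/
def toStr (m : List Bool) : List Char := m.map (fun b => if b then '1' else '0')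

/-- Binary successor of an MSB-first bit list, with carry-out. -/
def succW : List Bool → List Bool × Bool
  | [] => ([], true)
  | b :: bs =>
    let r := succW bs
    (if r.2 then (!b) :: r.1 else b :: r.1, b && r.2)

/-- All k-bit masks, MSB first, in counting order 0 .. 2^k − 1. -/
def allMasks : Nat → List (List Bool)
  | 0 => [[]]
  | k+1 => (allMasks k).map (false :: ·) ++ (allMasks k).map (true :: ·)

/-- Apply a mask: swap the letter at each position whose bit is set. -/
def applyMask : List (Int × Char) → List Bool → List Char → List Char
  | [], _, c => c
  | _ :: _, [], c => c
  | (p,ch) :: r, b :: bs, c =>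
      applyMask r bs (if b then PySem.List.pySetD c p (wordSwap.getD ch ch) else c)

/-- `CH s l e`: starting at `s`, the list `l` is the succ-chain of masks and `e` follows it. -/
def CH : List Bool → List (List Bool) → List Bool → Prop
  | s, [], e => s = e
  | s, m :: r, e => s = m ∧ CH (succW m).1 r e

theorem length_toStr (m : List Bool) : (toStr m).length = m.length := by
  simp [toStr]

theorem one_mem_toStr (m : List Bool) : '1' ∈ toStr m ↔ true ∈ m := by
  simp only [toStr, List.mem_map]
  constructor
  · rintro ⟨b, hb, he⟩
    cases b
    · simp at he
    · exact hb
  · intro h; exact ⟨true, h, rfl⟩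

theorem length_succW (m : List Bool) : (succW m).1.length = m.length := by
  induction m with
  | nil => rfl
  | cons b bs ih => simp only [succW]; split <;> simp [ih]

theorem succW_allTrue (k : Nat) : succW (List.replicate k true) = (List.replicate k false, true) := by
  induction k with
  | zero => rfl
  | succ n ih => simp [succW, List.replicate_succ, ih]

theorem succW_carry_iff (m : List Bool) : (succW m).2 = true ↔ m = List.replicate m.length true := by
  induction m with
  | nil => simp [succW]
  | cons b bs ih => simp [succW, List.replicate_succ, ih]

theorem succW_snoc (ys : List Bool) (b : Bool) :
    succW (ys ++ [b]) =
      if b then ((succW ys).1 ++ [false], (succW ys).2) else (ys ++ [true], false) := by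
  induction ys with
  | nil => cases b <;> rfl
  | cons y ys ih =>
    cases b
    · simp_all [succW]
    · simp_all [succW]
      split <;> simp_all

theorem bnLoop_prefix (j : Nat) : ∀ (ys : List Char) (c : Char), j ≤ ys.length →
    bnLoop (ys ++ [c]) j = ((bnLoop ys j).1 ++ [c], (bnLoop ys j).2) := by
  induction j with
  | zero => intro ys c _; rfl
  | succ j ih =>
    intro ys c h
    have hj : j < ys.length := by omega
    simp only [bnLoop, List.getD_append ys [c] ' ' j hj]
    split
    · simp [List.set_append_left j _ hj]
    · rw [List.set_append_left j _ hj, ih (ys.set j '0') c (by simp; omega)]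

theorem bnLoop_toStr (m : List Bool) :
    bnLoop (toStr m) m.length = (toStr (succW m).1, !(succW m).2) := by
  induction m using List.reverseRecOn with
  | nil => rfl
  | append_singleton ys b ih =>
    have hlt : (toStr ys).length = ys.length := length_toStr ys
    have hts : toStr (ys ++ [b]) = toStr ys ++ [if b then '1' else '0'] := by simp [toStr]
    rw [hts, succW_snoc]
    have hget : ∀ c : Char, (toStr ys ++ [c]).getD ys.length ' ' = c := by
      intro c; rw [← hlt]; simp
    have hset : ∀ c d : Char, (toStr ys ++ [c]).set ys.length d = toStr ys ++ [d] := by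
      intro c d; rw [← hlt, List.set_append_right _ _ (le_refl _)]; simp
    cases b
    · -- last bit 0: set it to 1, break
      simp only [List.length_append, List.length_singleton, if_false, Bool.false_eq_true]
      simp only [bnLoop, hget, hset]
      simp [toStr]
    · -- last bit 1: set to 0, carry on
      simp only [List.length_append, List.length_singleton, if_true]
      simp only [bnLoop, hget, hset]
      rw [if_neg (by decide), ← hlt, bnLoop_prefix _ _ _ (le_refl _), hlt, ih]
      simp [toStr]

theorem zeros_foldl (n : Nat) :
    (List.range n).foldl (fun s _ => s ++ ['0']) [] = List.replicate n '0' := by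
  rw [PySem.List.foldl_append_singleton_eq_map (f := fun _ => '0')]
  simp [List.map_const']

theorem binary_num_toStr (m : List Bool) :
    binary_num (toStr m) m.length = toStr (succW m).1 := by
  unfold binary_num
  rw [length_toStr, bnLoop_toStr]
  cases hc : (succW m).2
  · -- no carry: the incremented string is returned unchanged
    have : (toStr (succW m).1).length = m.length := by rw [length_toStr, length_succW]
    simp [this]
  · -- carry out: Python prepends '1', overflows max_length, rebuilds zeros
    have hm : m = List.replicate m.length true := (succW_carry_iff m).1 hc
    have h1 : (succW m).1 = List.replicate m.length false := by
      conv_lhs => rw [hm]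
      rw [succW_allTrue]
    have : ¬ m.length < ('1' :: toStr (succW m).1).length → False := by
      intro h; apply h; simp [length_toStr, length_succW]
    simp only [Bool.not_true, if_false, Bool.false_eq_true]
    rw [if_pos (by simp [length_toStr, length_succW]), zeros_foldl, h1]
    simp [toStr]

theorem length_allMasks (k : Nat) : (allMasks k).length = 2 ^ k := by
  induction k with
  | zero => rfl
  | succ n ih => simp [allMasks, ih, pow_succ]; ring

theorem length_mem_allMasks (k : Nat) : ∀ m ∈ allMasks k, m.length = k := by
  induction k with
  | zero => simp [allMasks]
  | succ n ih =>
    intro m hm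
    simp only [allMasks, List.mem_append, List.mem_map] at hm
    rcases hm with ⟨x, hx, rfl⟩ | ⟨x, hx, rfl⟩ <;> simp [ih x hx]

theorem allMasks_head (k : Nat) : ∃ t, allMasks k = List.replicate k false :: t := by
  induction k with
  | zero => exact ⟨[], rfl⟩
  | succ n ih =>
    obtain ⟨t, ht⟩ := ih
    refine ⟨List.map (false :: ·) t ++ (allMasks n).map (true :: ·), ?_⟩
    simp [allMasks, ht, List.replicate_succ]

theorem allMasks_ne_nil (k : Nat) : allMasks k ≠ [] := by
  intro h
  have := length_allMasks k
  rw [h] at this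
  simp at this
  have h2 : (0:Nat) < 2 ^ k := Nat.two_pow_pos k
  omega

theorem allMasks_getLast? (k : Nat) : (allMasks k).getLast? = some (List.replicate k true) := by
  induction k with
  | zero => rfl
  | succ n ih =>
    have hne : (allMasks n).map (true :: ·) ≠ [] := by
      simp [allMasks_ne_nil n]
    rw [show allMasks (n+1) = (allMasks n).map (false :: ·) ++ (allMasks n).map (true :: ·) from rfl,
      List.getLast?_append_of_ne_nil _ hne, List.getLast?_map, ih]
    simp [List.replicate_succ]

theorem allMasks_dropLast (k : Nat) : ∀ m ∈ (allMasks k).dropLast, m ≠ List.replicate k true := by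
  induction k with
  | zero => simp [allMasks]
  | succ n ih =>
    intro m hm
    have hne : (allMasks n).map (true :: ·) ≠ [] := by simp [allMasks_ne_nil n]
    rw [show allMasks (n+1) = (allMasks n).map (false :: ·) ++ (allMasks n).map (true :: ·) from rfl,
      List.dropLast_append_of_ne_nil hne, ← List.map_dropLast] at hm
    rcases List.mem_append.1 hm with h | h
    · obtain ⟨x, _, rfl⟩ := List.mem_map.1 h
      simp [List.replicate_succ]
    · obtain ⟨x, hx, rfl⟩ := List.mem_map.1 h
      simp only [List.replicate_succ, ne_eq, List.cons.injEq, true_and]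
      exact ih x hx

theorem allMasks_drop_one_mem (k : Nat) : ∀ m ∈ (allMasks k).drop 1, true ∈ m := by
  induction k with
  | zero => simp [allMasks]
  | succ n ih =>
    intro m hm
    obtain ⟨t, ht⟩ := allMasks_head n
    rw [show allMasks (n+1) = (allMasks n).map (false :: ·) ++ (allMasks n).map (true :: ·) from rfl,
      ht] at hm
    simp only [List.map_cons, List.cons_append, List.drop_succ_cons, List.drop_zero] at hm
    rcases List.mem_append.1 hm with h | h
    · obtain ⟨x, hx, rfl⟩ := List.mem_map.1 h
      have : x ∈ (allMasks n).drop 1 := by rw [ht]; simpa using hx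
      simp [ih x this]
    · rcases List.mem_cons.1 h with rfl | h
      · simp
      · obtain ⟨x, _, rfl⟩ := List.mem_map.1 h
        simp

theorem CH_append {s m e : List Bool} {l1 l2 : List (List Bool)}
    (h1 : CH s l1 m) (h2 : CH m l2 e) : CH s (l1 ++ l2) e := by
  induction l1 generalizing s with
  | nil => simp only [CH] at h1; subst h1; simpa using h2
  | cons x r ih => exact ⟨h1.1, ih h1.2⟩

theorem CH_snoc_inv {s e x : List Bool} {l : List (List Bool)}
    (h : CH s (l ++ [x]) e) : CH s l x ∧ (succW x).1 = e := by
  induction l generalizing s with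
  | nil => exact ⟨h.1, h.2⟩
  | cons m r ih =>
    obtain ⟨h1, h2⟩ := h
    exact ⟨⟨h1, (ih h2).1⟩, (ih h2).2⟩

theorem CH_lift {s e : List Bool} {l : List (List Bool)} (b : Bool)
    (hnc : ∀ m ∈ l, (succW m).2 = false) (h : CH s l e) :
    CH (b :: s) (l.map (b :: ·)) (b :: e) := by
  induction l generalizing s with
  | nil => simp only [CH, List.map_nil] at h ⊢; rw [h]
  | cons m r ih =>
    obtain ⟨rfl, hr⟩ := h
    refine ⟨rfl, ?_⟩
    have hm : (succW (b :: s)).1 = b :: (succW s).1 := by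
      simp [succW, hnc s (by simp)]
    rw [hm]
    exact ih (fun x hx => hnc x (by simp [hx])) hr

theorem CH_lift_cycle (k : Nat) (b : Bool)
    (ih : CH (List.replicate k false) (allMasks k) (List.replicate k false)) :
    CH (b :: List.replicate k false) ((allMasks k).map (b :: ·))
      ((!b) :: List.replicate k false) := by
  have hne := allMasks_ne_nil k
  have hlastv : (allMasks k).getLast hne = List.replicate k true := by
    have h := allMasks_getLast? k
    rw [List.getLast?_eq_some_getLast hne] at h
    exact Option.some.inj h
  have hsplit : allMasks k = (allMasks k).dropLast ++ [List.replicate k true] := by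
    conv_lhs => rw [← List.dropLast_append_getLast hne]
    rw [hlastv]
  rw [hsplit] at ih
  obtain ⟨hI, _⟩ := CH_snoc_inv ih
  have hnc : ∀ m ∈ (allMasks k).dropLast, (succW m).2 = false := by
    intro m hm
    have hlen : m.length = k := length_mem_allMasks k m (List.mem_of_mem_dropLast hm)
    have hne' : m ≠ List.replicate k true := allMasks_dropLast k m hm
    cases hcar : (succW m).2
    · rfl
    · exact absurd (hlen ▸ (succW_carry_iff m).1 hcar) hne'
  have part1 : CH (b :: List.replicate k false)
      (((allMasks k).dropLast).map (b :: ·)) (b :: List.replicate k true) :=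
    CH_lift b hnc hI
  have last : CH (b :: List.replicate k true) [b :: List.replicate k true]
      ((!b) :: List.replicate k false) := by
    refine ⟨rfl, ?_⟩
    simp [CH, succW, succW_allTrue]
  have hres := CH_append part1 last
  rw [hsplit, List.map_append]
  simpa using hres

theorem allMasks_cycle (k : Nat) :
    CH (List.replicate k false) (allMasks k) (List.replicate k false) := by
  induction k with
  | zero => exact ⟨rfl, rfl⟩
  | succ n ih =>
    have p1 := CH_lift_cycle n false ih
    have p2 := CH_lift_cycle n true ih
    simp only [Bool.not_false, Bool.not_true] at p1 p2
    have := CH_append p1 p2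
    simpa [allMasks, List.replicate_succ] using this

theorem allMasks_chain (k : Nat) :
    CH (succW (List.replicate k false)).1 ((allMasks k).drop 1) (List.replicate k false) := by
  obtain ⟨t, ht⟩ := allMasks_head k
  have := allMasks_cycle k
  rw [ht] at this ⊢
  simpa using this.2

theorem succW_zeros (k : Nat) (h : 1 ≤ k) :
    (succW (List.replicate k false)).1 = List.replicate (k-1) false ++ [true] := by
  induction k with
  | zero => omega
  | succ n ih =>
    cases n with
    | zero => rfl
    | succ p =>
      have hcar : (succW (List.replicate (p+1) false)).2 = false := by
        cases hcar : (succW (List.replicate (p+1) false)).2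
        · rfl
        · have := (succW_carry_iff _).1 hcar
          simp [List.replicate_succ] at this
      rw [List.replicate_succ]
      have h1 : (succW (false :: List.replicate (p+1) false)).1
          = false :: (succW (List.replicate (p+1) false)).1 := by
        simp [succW, hcar]
      rw [h1, ih (by omega)]
      simp [List.replicate_succ]

theorem lsBinInit_range' (n : Nat) : ∀ (a : Nat) (acc : List Char),
    lsBinInit (List.range' a n) (a + n) acc =
      if n = 0 then acc else acc ++ List.replicate (n-1) '0' ++ ['1'] := by
  induction n with
  | zero => intro a acc; rfl
  | succ m ihm =>
    intro a acc
    rw [List.range'_succ]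
    cases m with
    | zero => simp [lsBinInit]
    | succ p =>
      have hne : (a == a + (p + 1 + 1) - 1) = false := by
        simp only [beq_eq_false_iff_ne, ne_eq]
        omega
      simp only [lsBinInit, hne, Bool.false_eq_true, if_false]
      have := ihm (a+1) (acc ++ ['0'])
      rw [show a + 1 + (p + 1) = a + (p + 1 + 1) by omega] at this
      rw [this]
      simp [List.replicate_succ, List.append_assoc]

theorem lsBinInit_eq (card : Nat) :
    lsBinInit (List.range card) card [] = toStr (succW (List.replicate card false)).1 := by
  cases card with
  | zero => rfl
  | succ n =>
    have h := lsBinInit_range' (n+1) 0 []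
    rw [Nat.zero_add] at h
    rw [List.range_eq_range', h]
    rw [succW_zeros (n+1) (by omega)]
    simp [toStr]

theorem lsWhile_run (word : String) (locs : List (Int × Char)) :
    ∀ (l : List (List Bool)) (s : List Bool) (acc : List String) (fuel : Nat),
    CH s l (List.replicate locs.length false) →
    (∀ m ∈ l, true ∈ m ∧ m.length = locs.length) →
    l.length ≤ fuel →
    lsWhile word locs (toStr s) acc fuel
      = acc ++ l.map (fun m => String.ofList (lsPerm word locs (toStr m))) := by
  intro l
  induction l with
  | nil =>
    intro s acc fuel hch _ _
    simp only [CH] at hch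
    subst hch
    have hno : ¬ '1' ∈ toStr (List.replicate locs.length false) := by
      rw [one_mem_toStr]; simp
    cases fuel
    · simp [lsWhile]
    · simp [lsWhile, hno]
  | cons m r ih =>
    intro s acc fuel hch hmem hfuel
    obtain ⟨rfl, hr⟩ := hch
    obtain ⟨htrue, hlen⟩ := hmem s (by simp)
    cases fuel with
    | zero => simp at hfuel
    | succ f =>
      simp only [lsWhile, if_pos ((one_mem_toStr s).2 htrue)]
      rw [show locs.length = s.length from hlen.symm, binary_num_toStr]
      rw [ih (succW s).1 _ f hr (fun x hx => hmem x (by simp [hx])) (by simp at hfuel ⊢; omega)]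
      simp

theorem permFold (locs : List (Int × Char)) :
    ∀ (pre m : List Bool) (perm : List Char),
    m.length = locs.length →
    (∀ q ∈ locs, ∃ kq : Nat, q.1 = (kq : Int) ∧ kq < perm.length) →
    (PySem.List.enumerate locs (pre.length : Int)).foldl (lsPermStep (toStr (pre ++ m))) perm
      = applyMask locs m perm := by
  induction locs with
  | nil => intro pre m perm _ _; simp [PySem.List.enumerate_nil, applyMask]
  | cons q rest ih =>
    intro pre m perm hlen hpos
    obtain ⟨p, ch⟩ := q
    cases m with
    | nil => simp at hlen
    | cons b bs =>
      rw [PySem.List.enumerate_cons, List.foldl_cons]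
      have hstep : lsPermStep (toStr (pre ++ b :: bs)) perm ((pre.length : Int), (p, ch))
          = if b then PySem.List.pySetD perm p (wordSwap.getD ch ch) else perm := by
        unfold lsPermStep
        have hts : toStr (pre ++ b :: bs)
            = toStr pre ++ (if b then '1' else '0') :: toStr bs := by simp [toStr]
        have hget : PySem.List.pyGetD (toStr (pre ++ b :: bs)) (pre.length : Int) ' '
            = (if b then '1' else '0') := by
          rw [hts, PySem.List.pyGetD_natCast, ← length_toStr pre]
          simp
        rw [hget]
        obtain ⟨k, hpk, hklt⟩ := hpos (p, ch) (by simp)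
        cases b
        · simp
        · have hp : p = (k : Int) := hpk
          subst hp
          simp only [reduceIte]
          rw [PySem.List.pySetD_natCast]
          rw [PySem.List.slice_to_natCast]
          rw [show ((k : Int) + 1) = ((k + 1 : Nat) : Int) by push_cast; ring,
            PySem.List.slice_from_natCast]
          simp only [List.append_assoc, List.singleton_append]
          exact (List.set_eq_take_cons_drop _ hklt).symm
      rw [hstep]
      have hrec : ∀ perm' : List Char, perm'.length = perm.length →
          (PySem.List.enumerate rest ((pre.length : Int) + 1)).foldl
            (lsPermStep (toStr (pre ++ b :: bs))) perm' = applyMask rest bs perm' := by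
        intro perm' hplen
        have h1 : ((pre.length : Int) + 1) = (((pre ++ [b]).length : Nat) : Int) := by
          simp
        have h2 : toStr (pre ++ b :: bs) = toStr ((pre ++ [b]) ++ bs) := by
          rw [List.append_cons]
        rw [h1, h2]
        refine ih (pre ++ [b]) bs perm' (by simpa using hlen) ?_
        intro q hq
        obtain ⟨k, hk1, hk2⟩ := hpos q (by simp [hq])
        exact ⟨k, hk1, by omega⟩
      cases b
      · simp only [if_false, Bool.false_eq_true]
        rw [hrec perm rfl]
        simp [applyMask]
      · simp only [if_true]
        rw [hrec _ (PySem.List.length_pySetD _ _ _)]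
        simp [applyMask]

theorem lsPerm_eq (word : String) (locs : List (Int × Char)) (m : List Bool)
    (hlen : m.length = locs.length)
    (hpos : ∀ q ∈ locs, ∃ kq : Nat, q.1 = (kq : Int) ∧ kq < word.toList.length) :
    lsPerm word locs (toStr m) = applyMask locs m word.toList := by
  unfold lsPerm
  have h := permFold locs [] m word.toList hlen hpos
  simpa using h

theorem lsRec_eq (locs : List (Int × Char)) : ∀ chars : List Char,
    lsRec locs chars = (allMasks locs.length).map (fun m => String.ofList (applyMask locs m chars)) := by
  induction locs with
  | nil => intro chars; simp [lsRec, allMasks, applyMask]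
  | cons q rest ih =>
    intro chars
    obtain ⟨p, ch⟩ := q
    simp only [lsRec, List.length_cons, allMasks, List.map_append, List.map_map]
    rw [ih chars, ih (PySem.List.pySetD chars p (wordSwap.getD ch ch))]
    refine congrArg₂ (· ++ ·) (List.map_congr_left fun m _ => ?_)
      (List.map_congr_left fun m _ => ?_) <;> simp [Function.comp, applyMask]

theorem locs_eq (word : String) : lsLocs word = lsAltLocs word := by
  unfold lsLocs lsAltLocs
  rw [PySem.List.foldl_append_if_eq_filter]
  simp

theorem locs_pos (word : String) :
    ∀ q ∈ lsAltLocs word, ∃ kq : Nat, q.1 = (kq : Int) ∧ kq < word.toList.length := by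
  intro q hq
  unfold lsAltLocs at hq
  have hq' := List.mem_of_mem_filter hq
  obtain ⟨k, hk, rfl⟩ := (PySem.List.mem_enumerate_iff _ _ _).1 hq'
  exact ⟨k, by simp, hk⟩

-- ===== VERDICT (by name: the statement is the Claim_ definition above) =====
theorem letter_swap_spec : Claim_equal_letter_swap := by
  intro word _
  unfold Spec_letter_swap
  show lsWhile word (lsLocs word)
      (lsBinInit (List.range (lsLocs word).length) (lsLocs word).length []) []
      (2 ^ (lsLocs word).length)
    = (lsRec (lsAltLocs word) word.toList).drop 1
  rw [locs_eq]
  set L := lsAltLocs word with hL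
  set card := L.length with hcard
  rw [lsBinInit_eq card]
  have hrun := lsWhile_run word L ((allMasks card).drop 1)
      (succW (List.replicate card false)).1 [] (2 ^ card)
      (allMasks_chain card)
      (fun m hm => ⟨allMasks_drop_one_mem card m hm,
        length_mem_allMasks card m (List.mem_of_mem_drop hm)⟩)
      (by
        rw [List.length_drop, length_allMasks]
        exact Nat.sub_le _ _)
  rw [hrun, List.nil_append]
  rw [lsRec_eq L word.toList, ← List.map_drop]
  apply List.map_congr_left
  intro m hm
  rw [lsPerm_eq word L m
    (length_mem_allMasks card m (List.mem_of_mem_drop hm))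
    (locs_pos word)]
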